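-- pv_equiv track=rewrite | github.com/LuckasMacedo2/Compiladores | Compilador_k.night/Lexer/validacoes.py | valida_numero
-- ===== SOURCE A (Python) =====
-- troca_car_erro = 'a'
--
-- def valida_numero(palavra):
--     """
--     Valida o numero transformando-o em um identificador.
--
--     Por exemplo
--     >>>valida_num(11111)
--     >>>(True, 11111)
--
--     >>>valida_num(1a1)
--     >>>(False, aa1)"""
--
--     flag = 0 # Conta a quantidade de '.'
--     flag2 = False # Verifica se houve alguma letra no numero
--     word = ''
--     r = True # Verifica se ocorreu erro
--
--     if eh_numero(palavra[0]): # Verifica se e numero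
--         word = palavra[0] # Palavra similar ao lexema
--         l = len (palavra) # Tamanho da palavra
--
--         for i in range(1, l):
--             pontos = 0 # Ocorreu erro de '.'
--             if palavra[i] == '.':
--                 flag = flag + 1 # Contador de '.'
--                 if flag > 1:
--                     r = False
--                     pontos = 1 # Recebe 1 quando existe mais de um '.'
--
--             if (eh_letra(palavra[i]) or palavra[i] == '_') and not flag2:
--                 r = False
--                 flag2 = True
--
--             if pontos:
--                 word = word + troca_car_erro
--             else:
--                 word = word + palavra[i]
--
--     else:
--         return r, palavra
--
--     if flag > 1:
--         indice = word.find('.')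
--         word = word[:indice] + troca_car_erro + word[indice+1:]
--         flag2 = True
--
--     if flag2:
--         word = troca_car_erro + word
--
--     return r, word
--
-- def eh_numero(num):
--     """Define se o valor esta entre (48, 57) que são os valores
--     da tabela ascii destinada aos numeros.
--     Recebi como paramêtro um caracter.
--
--     Por exemplo:
--     >>>eh_numero('4')
--     >>>True
--
--     >>>eh_numero('a')
--     >>>False"""
--
--     return ord(num) >= 48 and ord(num) <= 57
--
-- def eh_letra(caracter):
--     """Define se o valor esta entre (65, 90) que são os valores
--     da tabela ascii destinada as letras maiusculas.
--     Recebi como parametro um caracter que e convertido automaticamente para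
--     letra maiuscula
--
--
--     Por exemplo:
--     >>>eh_numero('a')
--     >>>True
--
--     >>>eh_numero('1')
--     >>>False"""
--
--     return (ord(caracter.upper()) >= 65 and ord(caracter.upper()) <= 90)
-- ===== SOURCE B (Python) =====
-- troca_car_erro = 'a'
--
-- def valida_numero(palavra):
--     """Simpler two-pass rewrite: count dots and detect letters/underscores
--     up front, then build the corrected word in one comprehension."""
--     if not ('0' <= palavra[0] <= '9'):
--         return True, palavra
--     rest = palavra[1:]
--     dots = rest.count('.')
--     err = dots > 1 or any('A' <= c.upper() <= 'Z' or c == '_' for c in rest)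
--     body = palavra[0] + (rest.replace('.', troca_car_erro) if dots > 1 else rest)
--     return not err, (troca_car_erro + body) if err else body
-- ===== Notes on version B (the rewrite author's own statement) =====
-- stated objective: simpler
-- what changed: Replaces A's single stateful scan (dot counter, letter flag, incremental word with a post-loop find-and-splice of the first kept dot) by a direct two-pass decomposition: count dots and detect letters/underscores up front, then rebuild the word mapping every dot to the error character only when there is more than one dot, prefixing the error character exactly when an error was found.
-- outside the precondition, e.g. on valida_numero(''): A raises IndexError, B raises IndexError
import Mathlib
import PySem

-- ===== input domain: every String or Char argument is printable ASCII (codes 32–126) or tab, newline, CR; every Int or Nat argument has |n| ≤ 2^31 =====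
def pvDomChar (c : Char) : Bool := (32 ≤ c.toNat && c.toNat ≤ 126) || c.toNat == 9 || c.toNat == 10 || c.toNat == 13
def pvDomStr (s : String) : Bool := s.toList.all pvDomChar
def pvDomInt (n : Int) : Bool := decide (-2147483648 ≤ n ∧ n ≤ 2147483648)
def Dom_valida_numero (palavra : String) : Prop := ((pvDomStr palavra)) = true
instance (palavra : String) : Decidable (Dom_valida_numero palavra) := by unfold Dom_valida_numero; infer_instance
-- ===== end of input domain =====

-- B is a simpler two-pass decomposition of A's stateful scan (same cost); both raise IndexError on "".

-- ===== PORT A =====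
-- eh_numero: ord(num) in [48, 57]
def ehNumero (num : Char) : Bool := 48 ≤ num.toNat && num.toNat ≤ 57

-- eh_letra: ord(caracter.upper()) in [65, 90]
def ehLetra (caracter : Char) : Bool :=
  65 ≤ (PySem.Chars.upperChar caracter).toNat && (PySem.Chars.upperChar caracter).toNat ≤ 90

-- the body of A's for-loop, state (flag, flag2, word, r)
def vnStep (st : Nat × Bool × List Char × Bool) (ci : Char) : Nat × Bool × List Char × Bool :=
  let (flag, flag2, word, r) := st
  let (flag, r, pontos) :=
    if ci = '.' then
      let flag := flag + 1
      if flag > 1 then (flag, false, true) else (flag, r, false)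
    else (flag, r, false)
  let (r, flag2) := if (ehLetra ci || ci = '_') && !flag2 then (false, true) else (r, flag2)
  let word := if pontos then word ++ ['a'] else word ++ [ci]
  (flag, flag2, word, r)

def valida_numero (palavra : String) : Bool × String :=
  match PySem.Str.pyGet? palavra 0 with
  | none => (true, palavra)  -- palavra[0] raises IndexError here (excluded by Pre_)
  | some c0 =>
    if ehNumero c0 then
      -- word = palavra[0]; for i in range(1, l): …
      let st := (palavra.toList.drop 1).foldl vnStep (0, false, [c0], true)
      let flag := st.1
      let flag2 := st.2.1
      let word := st.2.2.1
      let r := st.2.2.2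
      let (word, flag2) :=
        if flag > 1 then
          let indice := PySem.Chars.find word ['.']
          (PySem.List.slice word none (some indice) ++ ['a'] ++
             PySem.List.slice word (some (indice + 1)) none, true)
        else (word, flag2)
      let word := if flag2 then 'a' :: word else word
      (r, String.mk word)
    else (true, palavra)

-- ===== PORT B =====
-- 'A' <= c.upper() <= 'Z' or c == '_'
def isLU (c : Char) : Bool :=
  ('A' ≤ PySem.Chars.upperChar c && PySem.Chars.upperChar c ≤ 'Z') || c = '_'

def valida_numero_alt (palavra : String) : Bool × String :=
  match PySem.Str.pyGet? palavra 0 with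
  | none => (true, palavra)  -- palavra[0] raises IndexError here (excluded by Pre_)
  | some c0 =>
    if !('0' ≤ c0 && c0 ≤ '9') then (true, palavra)
    else
      let rest := palavra.toList.drop 1
      let dots := rest.count '.'
      let err := dots > 1 || rest.any isLU
      let tail := if dots > 1 then rest.map (fun c => if c = '.' then 'a' else c) else rest
      let body := c0 :: tail
      (!err, String.mk (if err then 'a' :: body else body))

-- ===== PRECONDITION & SPEC =====
-- Pre_ excludes only the empty string, on which A raises IndexError at palavra[0].
def Pre_valida_numero (palavra : String) : Prop := palavra ≠ ""
instance (palavra : String) : Decidable (Pre_valida_numero palavra) := by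
  unfold Pre_valida_numero; infer_instance

def pvWitness_valida_numero : String := "1a.2."

def Spec_valida_numero (palavra : String) (out : Bool × String) : Prop := out = valida_numero_alt palavra
instance (palavra : String) (out : Bool × String) : Decidable (Spec_valida_numero palavra out) := by unfold Spec_valida_numero; infer_instance

-- ===== CLAIM (what is proved, stated in full; the proofs are below) =====
def Claim_equal_valida_numero : Prop := ∀ (palavra : String), Dom_valida_numero palavra → Pre_valida_numero palavra → Spec_valida_numero palavra (valida_numero palavra)

-- ===== LEMMAS AND PROOFS =====

-- A's word after the loop: first dot kept, later dots replaced by 'a'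
def wA : Nat → List Char → List Char
  | _, [] => []
  | flag, c :: cs =>
    if c = '.' then (if flag + 1 > 1 then 'a' else '.') :: wA (flag + 1) cs
    else c :: wA flag cs

-- closed form of the r component
def rA (flag : Nat) (flag2 : Bool) (p : List Char) : Bool :=
  !((p.any isLU && !flag2) || decide (1 ≤ p.count '.' ∧ flag + p.count '.' > 1))

lemma isLU_eq (c : Char) : (ehLetra c || c = '_') = isLU c := by
  have hA : ('A' : Char).val.toNat = 65 := by decide
  have hZ : ('Z' : Char).val.toNat = 90 := by decide
  rw [Bool.eq_iff_iff]
  simp only [ehLetra, isLU, Bool.or_eq_true, Bool.and_eq_true, decide_eq_true_eq, Char.le_def,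
    UInt32.le_iff_toNat_le, hA, hZ]
  rfl

lemma vnStep_dot_hi (flag : Nat) (flag2 : Bool) (w : List Char) (r : Bool) (h : flag + 1 > 1) :
    vnStep (flag, flag2, w, r) '.' = (flag + 1, flag2, w ++ ['a'], false) := by
  simp [vnStep, h, show ehLetra '.' = false from by decide]

lemma vnStep_dot_lo (flag : Nat) (flag2 : Bool) (w : List Char) (r : Bool) (h : ¬ flag + 1 > 1) :
    vnStep (flag, flag2, w, r) '.' = (flag + 1, flag2, w ++ ['.'], r) := by
  simp [vnStep, h, show ehLetra '.' = false from by decide]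

lemma vnStep_lu_new (flag : Nat) (w : List Char) (r : Bool) (c : Char)
    (hc : c ≠ '.') (hl : isLU c = true) :
    vnStep (flag, false, w, r) c = (flag, true, w ++ [c], false) := by
  simp [vnStep, hc, isLU_eq, hl]

lemma vnStep_lu_old (flag : Nat) (w : List Char) (r : Bool) (c : Char)
    (hc : c ≠ '.') (hl : isLU c = true) :
    vnStep (flag, true, w, r) c = (flag, true, w ++ [c], r) := by
  simp [vnStep, hc, isLU_eq, hl]

lemma vnStep_other (flag : Nat) (flag2 : Bool) (w : List Char) (r : Bool) (c : Char)
    (hc : c ≠ '.') (hl : isLU c = false) :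
    vnStep (flag, flag2, w, r) c = (flag, flag2, w ++ [c], r) := by
  simp [vnStep, hc, isLU_eq, hl]

lemma foldA (p : List Char) : ∀ (flag : Nat) (flag2 : Bool) (w : List Char) (r : Bool),
    p.foldl vnStep (flag, flag2, w, r) =
      (flag + p.count '.', flag2 || p.any isLU, w ++ wA flag p, r && rA flag flag2 p) := by
  induction p with
  | nil => intro flag flag2 w r; simp [wA, rA]
  | cons c cs ih =>
    intro flag flag2 w r
    rw [List.foldl_cons]
    by_cases hc : c = '.'
    · subst hc
      by_cases hf : flag + 1 > 1
      · rw [vnStep_dot_hi flag flag2 w r hf, ih]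
        have hra : rA flag flag2 ('.' :: cs) = false := by
          have hd : decide (1 ≤ ('.' :: cs).count '.' ∧ flag + ('.' :: cs).count '.' > 1)
              = true := by
            rw [decide_eq_true_eq]
            refine ⟨by simp [List.count_cons], by simp [List.count_cons]; omega⟩
          simp [rA, List.count_cons]
          intro _
          omega
        simp only [Prod.mk.injEq]
        refine ⟨by simp [List.count_cons]; omega, by simp [show isLU '.' = false from by decide],
          by simp [wA, hf, List.append_assoc], by simp [hra]⟩
      · rw [vnStep_dot_lo flag flag2 w r hf, ih]
        have hra : rA (flag + 1) flag2 cs = rA flag flag2 ('.' :: cs) := by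
          simp only [rA, List.any_cons, List.count_cons_self,
            show isLU '.' = false from by decide, Bool.false_or]
          congr 2
          rw [decide_eq_decide]; omega
        simp only [Prod.mk.injEq]
        refine ⟨by simp [List.count_cons]; omega, by simp [show isLU '.' = false from by decide],
          by simp [wA, hf, List.append_assoc], by rw [hra]⟩
    · have hw : wA flag (c :: cs) = c :: wA flag cs := by simp [wA, hc]
      have hcnt : (c :: cs).count '.' = cs.count '.' := by simp [List.count_cons, hc]
      by_cases hl : isLU c = true
      · cases flag2 with
        | false =>
          rw [vnStep_lu_new flag w r c hc hl, ih]
          have hra : rA flag false (c :: cs) = false := by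
            simp [rA, List.any_cons, hl]
          simp only [Prod.mk.injEq]
          exact ⟨by rw [hcnt], by simp [List.any_cons, hl],
            by simp [hw, List.append_assoc], by simp [hra]⟩
        | true =>
          rw [vnStep_lu_old flag w r c hc hl, ih]
          have hra : rA flag true cs = rA flag true (c :: cs) := by
            simp [rA, hcnt]
          simp only [Prod.mk.injEq]
          exact ⟨by rw [hcnt], by simp, by simp [hw, List.append_assoc], by rw [hra]⟩
      · simp only [Bool.not_eq_true] at hl
        rw [vnStep_other flag flag2 w r c hc hl, ih]
        have hra : rA flag flag2 cs = rA flag flag2 (c :: cs) := by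
          simp [rA, List.any_cons, hl, hcnt]
        simp only [Prod.mk.injEq]
        exact ⟨by rw [hcnt], by simp [List.any_cons, hl],
          by simp [hw, List.append_assoc], by rw [hra]⟩

lemma wA_of_count_zero (p : List Char) (flag : Nat) (h : p.count '.' = 0) : wA flag p = p := by
  induction p generalizing flag with
  | nil => simp [wA]
  | cons c cs ih =>
    have hc : c ≠ '.' := by
      intro he; subst he; simp [List.count_cons_self] at h
    simp [wA, hc, ih _ (by simpa [List.count_cons, hc] using h)]

lemma wA_of_count_le_one (p : List Char) (h : p.count '.' ≤ 1) : wA 0 p = p := by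
  induction p with
  | nil => simp [wA]
  | cons c cs ih =>
    by_cases hc : c = '.'
    · subst hc
      have : cs.count '.' = 0 := by simp [List.count_cons_self] at h; omega
      simp [wA, wA_of_count_zero cs 1 this]
    · simp [wA, hc, ih (by simpa [List.count_cons, hc] using h)]

lemma wA_of_pos (p : List Char) (flag : Nat) (h : 1 ≤ flag) :
    wA flag p = p.map (fun c => if c = '.' then 'a' else c) := by
  induction p generalizing flag with
  | nil => simp [wA]
  | cons c cs ih =>
    by_cases hc : c = '.'
    · subst hc; simp [wA, ih (flag + 1) (by omega)]; omega
    · simp [wA, hc, ih flag h]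

-- replace the first '.' by 'a'
def replaceFirst : List Char → List Char
  | [] => []
  | c :: cs => if c = '.' then 'a' :: cs else c :: replaceFirst cs

lemma replaceFirst_wA (p : List Char) (h : 1 ≤ p.count '.') :
    replaceFirst (wA 0 p) = p.map (fun c => if c = '.' then 'a' else c) := by
  induction p with
  | nil => simp at h
  | cons c cs ih =>
    by_cases hc : c = '.'
    · subst hc; simp [wA, replaceFirst, wA_of_pos cs 1 le_rfl]
    · have : 1 ≤ cs.count '.' := by simpa [List.count_cons, hc] using h
      simp [wA, hc, replaceFirst, ih this]

lemma dot_mem_wA (p : List Char) (h : 1 ≤ p.count '.') : '.' ∈ wA 0 p := by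
  induction p with
  | nil => simp at h
  | cons c cs ih =>
    by_cases hc : c = '.'
    · subst hc; simp [wA]
    · have : 1 ≤ cs.count '.' := by simpa [List.count_cons, hc] using h
      simp [wA, hc, ih this]

lemma head_drop_dot_iff (w : List Char) (j : Nat) :
    ['.'] <+: w.drop j ↔ (w.drop j).head? = some '.' := by
  constructor
  · rintro ⟨t, ht⟩; rw [← ht]; rfl
  · intro h
    cases hd : w.drop j with
    | nil => simp [hd] at h
    | cons x xs => rw [hd] at h; simp at h; exact ⟨xs, by simp [hd, h]⟩

lemma splice_eq_replaceFirst (w : List Char) (n : Nat)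
    (h1 : (w.drop n).head? = some '.') (h2 : ∀ j < n, (w.drop j).head? ≠ some '.') :
    w.take n ++ ['a'] ++ w.drop (n + 1) = replaceFirst w := by
  induction w generalizing n with
  | nil => simp at h1
  | cons c cs ih =>
    cases n with
    | zero =>
      simp at h1
      simp [replaceFirst, h1]
    | succ m =>
      have hc : c ≠ '.' := by
        intro he; exact h2 0 (Nat.succ_pos m) (by simp [he])
      have ih' := ih m (by simpa using h1) (fun j hj => by
        have := h2 (j + 1) (by omega); simpa using this)
      simp [replaceFirst, hc, List.take_succ_cons, List.drop_succ_cons, ← ih']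

lemma find_splice (w : List Char) (h : '.' ∈ w) :
    PySem.List.slice w none (some (PySem.Chars.find w ['.'])) ++ ['a'] ++
      PySem.List.slice w (some (PySem.Chars.find w ['.'] + 1)) none = replaceFirst w := by
  have hinf : ['.'] <:+: w := by
    obtain ⟨l, r, hlr⟩ := List.append_of_mem h
    exact ⟨l, r, by simp [hlr]⟩
  have hpos : 0 ≤ PySem.Chars.find w ['.'] := (PySem.Chars.find_nonneg_iff w ['.']).2 hinf
  obtain ⟨hpre, hmin⟩ := PySem.Chars.find_spec hpos
  set n : Nat := (PySem.Chars.find w ['.']).toNat with hn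
  have hcast : PySem.Chars.find w ['.'] = (n : Int) := by omega
  rw [hcast, show ((n : Int) + 1) = ((n + 1 : Nat) : Int) by push_cast; ring,
    PySem.List.slice_to_natCast, PySem.List.slice_from_natCast]
  exact splice_eq_replaceFirst w n ((head_drop_dot_iff w n).1 hpre)
    (fun j hj => fun hh => hmin j hj ((head_drop_dot_iff w j).2 hh))

lemma ehNumero_eq (c : Char) : ehNumero c = ('0' ≤ c && c ≤ '9') := by
  have h0 : ('0' : Char).val.toNat = 48 := by decide
  have h9 : ('9' : Char).val.toNat = 57 := by decide
  rw [Bool.eq_iff_iff]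
  simp only [ehNumero, Bool.and_eq_true, decide_eq_true_eq, Char.le_def,
    UInt32.le_iff_toNat_le, h0, h9]
  rfl

lemma ehNumero_ne_dot (c : Char) (h : ehNumero c = true) : c ≠ '.' := by
  intro he; subst he; simp [ehNumero] at h

lemma rA_init (p : List Char) :
    rA 0 false p = !(decide (1 < p.count '.') || p.any isLU) := by
  rcases Nat.lt_or_ge 1 (p.count '.') with h | h
  · have d1 : decide (1 ≤ p.count '.' ∧ 0 + p.count '.' > 1) = true := by
      rw [decide_eq_true_eq]; omega
    have d2 : decide (1 < p.count '.') = true := by rw [decide_eq_true_eq]; omega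
    simp [rA, d1, d2]
    intro _
    exact List.count_pos_iff.mp (by omega)
  · have d1 : decide (1 ≤ p.count '.' ∧ 0 + p.count '.' > 1) = false := by
      rw [decide_eq_false_iff_not]; omega
    have d2 : decide (1 < p.count '.') = false := by rw [decide_eq_false_iff_not]; omega
    simp [rA, d1, d2]

-- the core equality, on the character list
lemma main_list (c0 : Char) (p : List Char) :
    valida_numero (String.mk (c0 :: p)) = valida_numero_alt (String.mk (c0 :: p)) := by
  have htl : (String.mk (c0 :: p)).toList = c0 :: p := Eq.symm (String.ofList_eq.mp rfl)
  have hget : PySem.Str.pyGet? (String.mk (c0 :: p)) 0 = some c0 := by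
    simp [htl, PySem.List.pyGet?_zero]
  simp only [valida_numero, valida_numero_alt, hget]
  rw [← ehNumero_eq]
  by_cases hnum : ehNumero c0 = true
  · simp only [hnum, Bool.not_true, reduceIte]
    have hdrop : (String.mk (c0 :: p)).toList.drop 1 = p := by simp [htl]
    rw [hdrop, foldA p 0 false [c0] true]
    simp only [Bool.true_and, Nat.zero_add, Bool.false_or, rA_init]
    by_cases hgt : p.count '.' > 1
    · have hge1 : 1 ≤ p.count '.' := by omega
      have hmem : '.' ∈ ([c0] ++ wA 0 p) := by
        simp [dot_mem_wA p hge1]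
      have hrep : replaceFirst ([c0] ++ wA 0 p) =
          c0 :: p.map (fun c => if c = '.' then 'a' else c) := by
        simp [replaceFirst, ehNumero_ne_dot c0 hnum, replaceFirst_wA p hge1]
      simp only [if_pos hgt, find_splice _ hmem, hrep]
      simp [hgt]
    · simp only [if_neg hgt]
      have h1 : p.count '.' ≤ 1 := by omega
      rw [wA_of_count_le_one p h1]
      simp only [decide_eq_true_eq] at *
      have : ¬ (1 < p.count '.') := hgt
      simp only [decide_eq_false this, Bool.false_or]
      cases ha : p.any isLU <;> simp [List.singleton_append]
  · simp only [Bool.not_eq_true] at hnum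
    simp [hnum]

-- ===== VERDICT (by name: the statement is the Claim_ definition above) =====
theorem valida_numero_spec : Claim_equal_valida_numero := by
  intro palavra _ hpre
  unfold Spec_valida_numero
  cases h : palavra.toList with
  | nil =>
    exfalso; apply hpre
    have h2 := congrArg String.ofList h
    rw [String.ofList_toList] at h2
    rw [h2]
  | cons c0 p =>
    have hp : palavra = String.mk (c0 :: p) := by
      have h2 := congrArg String.ofList h
      rw [String.ofList_toList] at h2
      exact h2
    rw [hp, main_list]
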